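-- pv_equiv track=rewrite | github.com/MarkSon-42/CodingTest_Python | Programmers_Python/명예의 전당.py | solution
-- ===== SOURCE A (Python) =====
-- def solution(k, score):
--     honor = []
--     answer = []
--     for i in range(len(score)):
--         if len(honor) < k:
--             honor.append(score[i])
--             answer.append(min(honor))
--             honor.sort()
--         else:
--             if score[i] >= max(honor):
--                 honor.append(score[i])
--                 honor.remove(min(honor))
--                 answer.append(min(honor))
--             elif score[i] <= min(honor):
--                 answer.append(min(honor))
--             elif score[i] >= min(honor) and score[i] <= max(honor):
--                 honor.append(score[i])
--                 honor.remove(min(honor))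
--                 answer.append(min(honor))
--
--     return answer
-- ===== SOURCE B (Python) =====
-- def solution(k, score):
--     # Maintain the current top-k as an ascending sorted list; each new score is
--     # placed by binary search, the smallest entry is dropped once the list holds
--     # more than k, and the day's answer is the list's first (smallest) element.
--     honor = []
--     answer = []
--     for s in score:
--         lo, hi = 0, len(honor)
--         while lo < hi:
--             mid = (lo + hi) // 2
--             if honor[mid] < s:
--                 lo = mid + 1
--             else:
--                 hi = mid
--         honor.insert(lo, s)
--         if len(honor) > k:
--             honor.pop(0)
--         answer.append(honor[0])
--     return answer
-- ===== Notes on version B (the rewrite author's own statement) =====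
-- stated objective: faster
-- what changed: B keeps the current top-k as a single ascending sorted list updated per day by a hand-written binary search (insert at bisect position, drop the head when over k, report the head), replacing A's per-day min/max scans, remove pass and warm-up sort.
-- outside the precondition, e.g. on solution(0, [1, 2]): A raises ValueError, B raises IndexError
import Mathlib
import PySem

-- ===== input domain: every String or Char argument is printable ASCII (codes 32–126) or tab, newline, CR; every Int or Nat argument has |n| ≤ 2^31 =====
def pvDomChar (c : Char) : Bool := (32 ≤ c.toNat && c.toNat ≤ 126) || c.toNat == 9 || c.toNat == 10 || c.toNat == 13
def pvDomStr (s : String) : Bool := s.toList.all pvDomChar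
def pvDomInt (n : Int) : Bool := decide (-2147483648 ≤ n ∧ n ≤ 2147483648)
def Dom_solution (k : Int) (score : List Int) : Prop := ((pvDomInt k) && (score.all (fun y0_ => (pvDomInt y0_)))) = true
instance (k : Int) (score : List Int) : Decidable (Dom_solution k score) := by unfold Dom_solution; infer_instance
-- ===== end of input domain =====

-- B keeps the top-k as one ascending list updated by binary search, replacing A's per-day
-- min/max/remove/sort maintenance; equivalence of the RETURN value is proved on Pre_ (k ≥ 1 or empty input).

-- ===== PORT A =====
-- loop body of A, one day: state (honor, answer), incoming score s
def stepA (k : Int) (st : List Int × List Int) (s : Int) : List Int × List Int :=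
  let honor := st.1
  let answer := st.2
  if (honor.length : Int) < k then
    let honor1 := honor ++ [s]
    let answer1 := answer ++ [(PySem.List.min? honor1 (fun x => x)).getD 0]
    (PySem.List.sorted honor1 (fun x => x), answer1)
  else
    if s ≥ (PySem.List.max? honor (fun x => x)).getD 0 then
      let h1 := honor ++ [s]
      let h2 := (PySem.List.remove? h1 ((PySem.List.min? h1 (fun x => x)).getD 0)).getD h1
      (h2, answer ++ [(PySem.List.min? h2 (fun x => x)).getD 0])
    else if s ≤ (PySem.List.min? honor (fun x => x)).getD 0 then
      (honor, answer ++ [(PySem.List.min? honor (fun x => x)).getD 0])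
    else if s ≥ (PySem.List.min? honor (fun x => x)).getD 0 ∧ s ≤ (PySem.List.max? honor (fun x => x)).getD 0 then
      let h1 := honor ++ [s]
      let h2 := (PySem.List.remove? h1 ((PySem.List.min? h1 (fun x => x)).getD 0)).getD h1
      (h2, answer ++ [(PySem.List.min? h2 (fun x => x)).getD 0])
    else
      (honor, answer)

def solution (k : Int) (score : List Int) : List Int :=
  ((PySem.List.pyRange 0 (score.length : Int)).foldl
    (fun st i => stepA k st (PySem.List.pyGetD score i 0)) ([], [])).2

-- ===== PORT B =====
-- loop body of B, one day.  Source B's hand-written lo/hi binary-search while loop is exactly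
-- bisect_left, which PySem owns as PySem.List.bisectLeft (same loop, same midpoints).
def stepB (k : Int) (st : List Int × List Int) (s : Int) : List Int × List Int :=
  let honor := st.1
  let lo := PySem.List.bisectLeft honor s
  let h1 := PySem.List.insert honor (lo : Int) s
  let h2 := if (h1.length : Int) > k then ((PySem.List.pop? h1 0).getD (0, h1)).2 else h1
  (h2, st.2 ++ [PySem.List.pyGetD h2 0 0])

def solution_alt (k : Int) (score : List Int) : List Int :=
  (score.foldl (stepB k) ([], [])).2

-- ===== PRECONDITION & SPEC =====
-- Pre_ excludes exactly the inputs where A raises: k ≤ 0 with a nonempty score makes A call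
-- max([]) (ValueError); B raises there too (IndexError).
def Pre_solution (k : Int) (score : List Int) : Prop := 1 ≤ k ∨ score = []
instance (k : Int) (score : List Int) : Decidable (Pre_solution k score) := by unfold Pre_solution; infer_instance
def pvWitness_solution : Int × List Int := (2, [3, 1, 4, 1, 5])
def Spec_solution (k : Int) (score : List Int) (out : List Int) : Prop := out = solution_alt k score
instance (k : Int) (score : List Int) (out : List Int) : Decidable (Spec_solution k score out) := by unfold Spec_solution; infer_instance

-- ===== CLAIM (what is proved, stated in full; the proofs are below) =====
def Claim_equal_solution : Prop := ∀ (k : Int) (score : List Int), Dom_solution k score → Pre_solution k score → Spec_solution k score (solution k score)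

-- ===== LEMMAS AND PROOFS =====

-- the invariant tying A's honor list to B's honor list
def HonorInv (k : Int) (ha hb : List Int) : Prop :=
  ha.Perm hb ∧ hb.Pairwise (· ≤ ·) ∧ (hb.length : Int) ≤ k

-- a nonempty list has a min
lemma min?_ex {l : List Int} (h : l ≠ []) : ∃ m, PySem.List.min? l (fun x => x) = some m := by
  cases hm : PySem.List.min? l (fun x => x) with
  | none => exact absurd ((PySem.List.min?_eq_none_iff l _).mp hm) h
  | some m => exact ⟨m, rfl⟩

lemma max?_ex {l : List Int} (h : l ≠ []) : ∃ m, PySem.List.max? l (fun x => x) = some m := by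
  cases hm : PySem.List.max? l (fun x => x) with
  | none => exact absurd ((PySem.List.max?_eq_none_iff l _).mp hm) h
  | some m => exact ⟨m, rfl⟩

-- the min VALUE is determined by the multiset
lemma minv_unique {l1 l2 : List Int} (hp : l1.Perm l2) {m1 m2 : Int}
    (h1 : PySem.List.min? l1 (fun x => x) = some m1)
    (h2 : PySem.List.min? l2 (fun x => x) = some m2) : m1 = m2 :=
  le_antisymm (PySem.List.min?_isMin h1 m2 (hp.symm.subset (PySem.List.min?_mem h2)))
    (PySem.List.min?_isMin h2 m1 (hp.subset (PySem.List.min?_mem h1)))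

-- min of an ascending list is its head
lemma min?_of_sorted {b : Int} {t : List Int} (hs : (b :: t).Pairwise (· ≤ ·)) :
    PySem.List.min? (b :: t) (fun x => x) = some b := by
  obtain ⟨m, hm⟩ := min?_ex (l := b :: t) (by simp)
  have hmem : m ∈ b :: t := PySem.List.min?_mem hm
  have hble : b ≤ m := by
    rcases List.mem_cons.mp hmem with h | h
    · omega
    · exact (List.pairwise_cons.mp hs).1 m h
  have : m ≤ b := PySem.List.min?_isMin hm b (by simp)
  rw [hm, Option.some.injEq]; omega

-- B's insert-at-bisect: explicit take/drop form
lemma insert_nat (hb : List Int) (s : Int) (lo : Nat) (h : lo ≤ hb.length) :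
    PySem.List.insert hb (lo : Int) s = hb.take lo ++ s :: hb.drop lo := by
  simp only [PySem.List.insert, PySem.List.sliceIndices, Int.reduceLT, reduceIte]
  rw [if_neg (by omega : ¬ ((lo : Int) < 0))]
  have h2 : min (lo : Int) (hb.length : Int) = (lo : Int) := by omega
  rw [h2]
  simp

-- B's insert-at-bisect is a sorted permutation of s :: honor, one element longer
lemma insert_bisect (hb : List Int) (s : Int) (hs : hb.Pairwise (· ≤ ·)) :
    (PySem.List.insert hb ((PySem.List.bisectLeft hb s : Nat) : Int) s).Perm (s :: hb) ∧
    (PySem.List.insert hb ((PySem.List.bisectLeft hb s : Nat) : Int) s).Pairwise (· ≤ ·) ∧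
    (PySem.List.insert hb ((PySem.List.bisectLeft hb s : Nat) : Int) s).length = hb.length + 1 := by
  obtain ⟨hle, hlt, hge⟩ := PySem.List.bisectLeft_spec hb s hs
  set lo := PySem.List.bisectLeft hb s with hlo
  rw [insert_nat hb s lo hle]
  have htake : ∀ x ∈ hb.take lo, x < s := by
    intro x hx
    obtain ⟨i, hi, hix⟩ := List.mem_iff_getElem.mp hx
    have hi' : i < lo ∧ i < hb.length := by simpa [List.length_take] using hi
    have := hlt i hi'.2 hi'.1
    rw [List.getElem_take] at hix
    omega
  have hdrop : ∀ y ∈ hb.drop lo, s ≤ y := by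
    intro y hy
    obtain ⟨j, hj, hjy⟩ := List.mem_iff_getElem.mp hy
    have hj' : j < hb.length - lo := by simpa [List.length_drop] using hj
    have hjlen : lo + j < hb.length := by omega
    have := hge (lo + j) hjlen (by omega)
    rw [List.getElem_drop] at hjy
    omega
  refine ⟨?_, ?_, ?_⟩
  · exact List.perm_middle.trans (by rw [List.take_append_drop])
  · rw [List.pairwise_append]
    refine ⟨List.Pairwise.sublist (List.take_sublist _ _) hs, ?_, ?_⟩
    · exact List.pairwise_cons.mpr ⟨hdrop, List.Pairwise.sublist (List.drop_sublist _ _) hs⟩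
    · intro a ha b hbm
      rcases List.mem_cons.mp hbm with rfl | hbm
      · exact le_of_lt (htake a ha)
      · exact le_trans (le_of_lt (htake a ha)) (hdrop b hbm)
  · simp

-- A's "append s, remove the min": the remove really is List.erase at the min
lemma removeA_eq (l : List Int) {m : Int}
    (hm : PySem.List.min? l (fun x => x) = some m) :
    (PySem.List.remove? l m).getD l = l.erase m := by
  rw [PySem.List.remove?_eq_some_erase l m (PySem.List.min?_mem hm)]
  rfl

-- the full-house core shared by A's first and third else-branches:
-- A appends s and erases the min; B's new honor u is a sorted permutation of it
lemma full_core (ha hb u : List Int) (s c : Int)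
    (hperm : ha.Perm hb) (hcu : (c :: u).Perm (s :: hb)) (hcs : (c :: u).Pairwise (· ≤ ·))
    (hune : u ≠ []) {m : Int} (hm : PySem.List.min? (ha ++ [s]) (fun x => x) = some m) :
    ((ha ++ [s]).erase m).Perm u ∧
    (PySem.List.min? ((ha ++ [s]).erase m) (fun x => x)).getD 0 = PySem.List.pyGetD u 0 0 := by
  have hp1 : (ha ++ [s]).Perm (c :: u) :=
    ((List.perm_append_singleton s ha).trans ((hperm.cons s).trans hcu.symm))
  have hc : m = c := minv_unique hp1 hm (min?_of_sorted hcs)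
  have herase : ((ha ++ [s]).erase m).Perm u := by
    rw [hc]
    have h := hp1.erase c
    rwa [List.erase_cons_head] at h
  refine ⟨herase, ?_⟩
  obtain ⟨d, u', rfl⟩ : ∃ d u', u = d :: u' := by
    cases u with
    | nil => exact absurd rfl hune
    | cons d u' => exact ⟨d, u', rfl⟩
  have hne2 : (ha ++ [s]).erase m ≠ [] := by
    intro h0
    have hl := herase.length_eq
    rw [h0] at hl
    simp at hl
  obtain ⟨m2, hm2⟩ := min?_ex hne2
  have hdmin : PySem.List.min? (d :: u') (fun x => x) = some d :=
    min?_of_sorted (List.Pairwise.sublist (List.sublist_cons_self c _) hcs)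
  have : m2 = d := minv_unique herase hm2 hdmin
  rw [hm2, this, Option.getD_some]
  simp [PySem.List.pyGetD_of_nonneg]

-- single-day step: A's and B's states stay related and they emit the same value
lemma step_eq (k s : Int) (hk : 1 ≤ k) (ha hb : List Int) (hinv : HonorInv k ha hb) :
    ∀ ansA ansB : List Int, ansA = ansB →
      HonorInv k (stepA k (ha, ansA) s).1 (stepB k (hb, ansB) s).1 ∧
      (stepA k (ha, ansA) s).2 = ansA ++ [PySem.List.pyGetD (stepB k (hb, ansB) s).1 0 0] ∧
      (stepB k (hb, ansB) s).2 = ansB ++ [PySem.List.pyGetD (stepB k (hb, ansB) s).1 0 0] := by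
  intro ansA ansB hans
  obtain ⟨hperm, hsort, hlen⟩ := hinv
  have hlenEq : ha.length = hb.length := hperm.length_eq
  obtain ⟨hp1, hs1, hl1⟩ := insert_bisect hb s hsort
  set h1 := PySem.List.insert hb ((PySem.List.bisectLeft hb s : Nat) : Int) s with hh1
  obtain ⟨c, u, hcu⟩ : ∃ c u, h1 = c :: u := by
    cases hx : h1 with
    | nil => rw [hx] at hl1; simp at hl1
    | cons c u => exact ⟨c, u, rfl⟩
  by_cases hwarm : (ha.length : Int) < k
  · -- warm-up: honor not yet full
    have hnogt : ¬ ((h1.length : Int) > k) := by rw [hl1]; omega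
    have hB : stepB k (hb, ansB) s = (h1, ansB ++ [PySem.List.pyGetD h1 0 0]) := by
      simp only [stepB, ← hh1, if_neg hnogt]
    have hA : stepA k (ha, ansA) s
        = (PySem.List.sorted (ha ++ [s]) (fun x => x),
           ansA ++ [(PySem.List.min? (ha ++ [s]) (fun x => x)).getD 0]) := by
      simp only [stepA, if_pos hwarm]
    obtain ⟨m, hm⟩ := min?_ex (l := ha ++ [s]) (by simp)
    have hpAB : (PySem.List.sorted (ha ++ [s]) (fun x => x)).Perm h1 :=
      (PySem.List.sorted_perm _ _ _).trans
        ((List.perm_append_singleton s ha).trans ((hperm.cons s).trans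
          (insert_bisect hb s hsort).1.symm))
    have hp1' : (ha ++ [s]).Perm (c :: u) :=
      (List.perm_append_singleton s ha).trans ((hperm.cons s).trans (hcu ▸ hp1).symm)
    have hmc : m = c := minv_unique hp1' hm (min?_of_sorted (hcu ▸ hs1))
    rw [hA, hB]
    refine ⟨⟨hpAB, hs1, by show (h1.length : Int) ≤ k; omega⟩, ?_, rfl⟩
    rw [hm, Option.getD_some, hmc, hans, hcu]
    simp [PySem.List.pyGetD_of_nonneg]
  · -- honor is full: hb.length = k
    have hbfull : (hb.length : Int) = k := by omega
    have hbne : hb ≠ [] := by intro h0; rw [h0] at hbfull; simp at hbfull; omega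
    have hane : ha ≠ [] := by
      intro h0; rw [h0] at hlenEq
      exact hbne (List.length_eq_zero_iff.mp hlenEq.symm)
    obtain ⟨mnv, hmn⟩ := min?_ex hane
    obtain ⟨mxv, hmx⟩ := max?_ex hane
    -- B pops the head of h1
    have hgt : ((h1.length : Int) > k) := by rw [hl1]; omega
    have hpop : ((PySem.List.pop? h1 0).getD (0, h1)).2 = u := by
      rw [hcu]; simp [PySem.List.pop?, PySem.List.pyIdx?]
    have hB : stepB k (hb, ansB) s = (u, ansB ++ [PySem.List.pyGetD u 0 0]) := by
      simp only [stepB, ← hh1, if_pos hgt, hpop]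
    have hulen' : u.length = hb.length := by
      rw [hcu] at hl1
      simpa using hl1
    have hune : u ≠ [] := by
      intro h0
      rw [h0] at hulen'
      exact hbne (List.length_eq_zero_iff.mp (by simpa using hulen'.symm))
    have hcore := fun m hm => full_core ha hb u s c hperm (hcu ▸ hp1) (hcu ▸ hs1) hune (m := m) hm
    obtain ⟨m, hm⟩ := min?_ex (l := ha ++ [s]) (by simp)
    obtain ⟨hup, humin⟩ := hcore m hm
    have husort : u.Pairwise (· ≤ ·) :=
      List.Pairwise.sublist (List.sublist_cons_self c u) (hcu ▸ hs1)
    have hulen : (u.length : Int) ≤ k := by rw [hulen']; omega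
    by_cases hc1 : s ≥ (PySem.List.max? ha (fun x => x)).getD 0
    · -- A's first else-branch
      have hA : stepA k (ha, ansA) s
          = ((ha ++ [s]).erase m,
             ansA ++ [(PySem.List.min? ((ha ++ [s]).erase m) (fun x => x)).getD 0]) := by
        simp only [stepA, if_neg hwarm, if_pos hc1, hm, Option.getD_some,
          removeA_eq (ha ++ [s]) hm]
      rw [hA, hB]
      exact ⟨⟨hup, husort, hulen⟩, by rw [humin, hans], rfl⟩
    · by_cases hc2 : s ≤ (PySem.List.min? ha (fun x => x)).getD 0
      · -- A's second else-branch: honor unchanged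
        have hA : stepA k (ha, ansA) s
            = (ha, ansA ++ [(PySem.List.min? ha (fun x => x)).getD 0]) := by
          simp only [stepA, if_neg hwarm, if_neg hc1, if_pos hc2]
        rw [hmn, Option.getD_some] at hc2
        -- the popped head c equals s here, so u is a permutation of hb (hence of ha)
        have hp1' : (c :: u).Perm (s :: hb) := hcu ▸ hp1
        have hcs' : (c :: u).Pairwise (· ≤ ·) := hcu ▸ hs1
        have hcmem : c ∈ s :: hb := hp1'.subset (List.mem_cons_self)
        have hcmin : PySem.List.min? (c :: u) (fun x => x) = some c := min?_of_sorted hcs'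
        have hsmem : s ∈ c :: u := hp1'.symm.subset (List.mem_cons_self)
        have hcles : c ≤ s := PySem.List.min?_isMin hcmin s hsmem
        have hslec : s ≤ c := by
          rcases List.mem_cons.mp hcmem with rfl | hcb
          · omega
          · exact le_trans hc2 (PySem.List.min?_isMin hmn c (hperm.mem_iff.mpr hcb))
        have hcs : c = s := by omega
        have huhb : u.Perm hb := by
          have := hp1'.erase c
          rw [List.erase_cons_head] at this
          rw [hcs] at this
          rwa [List.erase_cons_head] at this
        obtain ⟨d, u', rfl⟩ : ∃ d u', u = d :: u' := by
          cases u with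
          | nil => exact absurd rfl hune
          | cons d u' => exact ⟨d, u', rfl⟩
        have hdmin : PySem.List.min? (d :: u') (fun x => x) = some d :=
          min?_of_sorted husort
        have hmd : mnv = d := minv_unique (hperm.trans huhb.symm) hmn hdmin
        rw [hA, hB]
        refine ⟨⟨hperm.trans huhb.symm, husort, hulen⟩, ?_, rfl⟩
        rw [hmn, Option.getD_some, hmd, hans]
        simp [PySem.List.pyGetD_of_nonneg]
      · -- A's third else-branch (condition provably true) = first branch's computation
        have hc3 : s ≥ (PySem.List.min? ha (fun x => x)).getD 0 ∧
            s ≤ (PySem.List.max? ha (fun x => x)).getD 0 := by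
          rw [hmn, Option.getD_some] at hc2 ⊢
          rw [hmx, Option.getD_some] at hc1 ⊢
          omega
        have hA : stepA k (ha, ansA) s
            = ((ha ++ [s]).erase m,
               ansA ++ [(PySem.List.min? ((ha ++ [s]).erase m) (fun x => x)).getD 0]) := by
          simp only [stepA, if_neg hwarm, if_neg hc1, if_neg hc2, if_pos hc3, hm,
            Option.getD_some, removeA_eq (ha ++ [s]) hm]
        rw [hA, hB]
        exact ⟨⟨hup, husort, hulen⟩, by rw [humin, hans], rfl⟩

-- the whole loop, by induction over the remaining days
lemma fold_eq (k : Int) (hk : 1 ≤ k) (rest : List Int) :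
    ∀ ha hb ans : List Int, HonorInv k ha hb →
      (rest.foldl (stepA k) (ha, ans)).2 = (rest.foldl (stepB k) (hb, ans)).2 := by
  induction rest with
  | nil => intro ha hb ans _; rfl
  | cons s rest ih =>
    intro ha hb ans hinv
    obtain ⟨hinv', hA2, hB2⟩ := step_eq k s hk ha hb hinv ans ans rfl
    simp only [List.foldl_cons]
    have hA : stepA k (ha, ans) s
        = ((stepA k (ha, ans) s).1, ans ++ [PySem.List.pyGetD (stepB k (hb, ans) s).1 0 0]) := by
      rw [← hA2]
    have hB : stepB k (hb, ans) s
        = ((stepB k (hb, ans) s).1, ans ++ [PySem.List.pyGetD (stepB k (hb, ans) s).1 0 0]) := by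
      rw [← hB2]
    rw [hA, hB]
    exact ih _ _ _ hinv'

-- ===== VERDICT (by name: the statement is the Claim_ definition above) =====
theorem solution_spec : Claim_equal_solution := by
  intro k score _ hpre
  unfold Spec_solution solution solution_alt
  rw [PySem.List.foldl_pyRange_zero_pyGetD' score 0 (stepA k) ([], [])]
  rcases hpre with hk | hnil
  · exact fold_eq k hk score [] [] [] ⟨List.Perm.refl _, List.Pairwise.nil, by simp; omega⟩
  · subst hnil; rfl
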